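-- pv_equiv track=rewrite | github.com/LuokeKingdom/LuokeCollection | LuokeCollection/main/battle/action_solver.py | reverse_data
-- ===== SOURCE A (Python) =====
-- def reverse_data(data):
--     return list(
--             zip(
--                 list(
--                     reversed(
--                         [
--                             data[-1][0] - data[i][0]
--                             for i in range(len(data))
--                         ]
--                     )
--                 ),
--                 list(reversed(list(zip(*data))[1])),
--             )
--         )
-- ===== SOURCE B (Python) =====
-- def reverse_data(data):
--     last = data[-1][0]
--     return [(last - x[0], x[1]) for x in reversed(data)]
-- ===== Notes on version B (the rewrite author's own statement) =====
-- stated objective: simpler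
-- what changed: Replaces A's transpose-then-recombine (index-based offset list, zip(*data) column extraction, two reversals, zip) with a single comprehension over reversed(data) emitting each row directly.
import Mathlib
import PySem

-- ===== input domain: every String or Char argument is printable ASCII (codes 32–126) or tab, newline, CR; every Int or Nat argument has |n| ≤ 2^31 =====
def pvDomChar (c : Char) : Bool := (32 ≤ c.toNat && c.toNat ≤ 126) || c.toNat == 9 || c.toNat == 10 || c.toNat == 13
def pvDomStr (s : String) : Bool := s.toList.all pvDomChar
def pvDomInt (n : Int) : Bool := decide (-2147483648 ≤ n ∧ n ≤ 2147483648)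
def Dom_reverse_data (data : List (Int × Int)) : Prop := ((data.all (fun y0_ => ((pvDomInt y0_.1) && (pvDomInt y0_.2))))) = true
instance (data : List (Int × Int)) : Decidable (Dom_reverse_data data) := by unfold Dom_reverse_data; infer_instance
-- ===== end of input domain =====

-- B replaces A's transpose-then-recombine (index offsets, zip(*data), two reversals, zip) with one comprehension over reversed(data); objective: simpler.


-- ===== PORT A =====
-- data[-1][0] and data[i][0] via PySem.List.pyGetD; exact on Pre_ (data ≠ []).
def reverse_data (data : List (Int × Int)) : List (Int × Int) :=
  let offs : List Int :=
    ((List.range data.length).map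
      (fun (i : Nat) => (PySem.List.pyGetD data (-1) (0, 0)).1 - (PySem.List.pyGetD data (i : Int) (0, 0)).1)).reverse
  -- list(zip(*data))[1] = the second column of data
  let col1 : List Int := (data.map Prod.snd).reverse
  offs.zip col1

-- ===== PORT B =====
def reverse_data_alt (data : List (Int × Int)) : List (Int × Int) :=
  let last := (PySem.List.pyGetD data (-1) (0, 0)).1
  data.reverse.map (fun x => (last - x.1, x.2))

-- ===== PRECONDITION & SPEC =====
-- Pre_ excludes the empty list, on which A raises IndexError (data[-1]).
def Pre_reverse_data (data : List (Int × Int)) : Prop := data ≠ []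
instance (data : List (Int × Int)) : Decidable (Pre_reverse_data data) := by unfold Pre_reverse_data; infer_instance
def pvWitness_reverse_data : (List (Int × Int)) := [(1, 2), (3, 4)]

def Spec_reverse_data (data : List (Int × Int)) (out : List (Int × Int)) : Prop := out = reverse_data_alt data
instance (data : List (Int × Int)) (out : List (Int × Int)) : Decidable (Spec_reverse_data data out) := by unfold Spec_reverse_data; infer_instance

-- ===== CLAIM (what is proved, stated in full; the proofs are below) =====
def Claim_equal_reverse_data : Prop := ∀ (data : List (Int × Int)), Dom_reverse_data data → Pre_reverse_data data → Spec_reverse_data data (reverse_data data)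

-- ===== LEMMAS AND PROOFS =====

-- A's index-based offset list equals a direct map over data.
theorem offs_eq_map (data : List (Int × Int)) (last : Int) :
    (List.range data.length).map
      (fun (i : Nat) => last - (PySem.List.pyGetD data (i : Int) (0, 0)).1)
    = data.map (fun x => last - x.1) := by
  apply List.ext_getElem
  · simp
  · intro i h1 h2
    simp only [List.getElem_map, List.getElem_range, PySem.List.pyGetD_natCast]
    simp at h1
    rw [List.getD_eq_getElem _ _ h1]

theorem zip_map_reverse (l : List (Int × Int)) (f g : (Int × Int) → Int) :
    ((l.map f).reverse).zip ((l.map g).reverse)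
    = l.reverse.map (fun x => (f x, g x)) := by
  rw [← List.map_reverse, ← List.map_reverse, List.zip_map', List.map_reverse]

-- ===== VERDICT (by name: the statement is the Claim_ definition above) =====
theorem reverse_data_spec : Claim_equal_reverse_data := by
  intro data _ _
  unfold Spec_reverse_data reverse_data reverse_data_alt
  simp only
  rw [offs_eq_map, zip_map_reverse, List.map_reverse]
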